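-- pv_equiv track=rewrite | github.com/KarlTDebiec/Scinoephile | scinoephile/image/bbox_manager.py | _get_key_and_merged_bbox
-- ===== SOURCE A (Python) =====
-- def _get_key_and_merged_bbox(
--     bboxes: list[tuple[int, int, int, int]],
--     i: int,
--     n: int,
-- ) -> tuple[tuple[int, ...], tuple[int, int, int, int]]:
--     """Get key and merged bbox from bboxes.
--
--     Arguments:
--         bboxes: Nascent list of bboxes [(x1, y1, x2, y2), ...]
--         i: Index of first bbox
--         n: Number of bboxes whose merging is under consideration
--     Returns:
--         Key and merged bbox
--     """
--     bboxes_slice = bboxes[i : i + n]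
--     widths = [bbox[2] - bbox[0] for bbox in bboxes_slice]
--     heights = [bbox[3] - bbox[1] for bbox in bboxes_slice]
--     gaps = [
--         bboxes_slice[i + 1][0] - bboxes_slice[i][2]
--         for i in range(len(bboxes_slice) - 1)
--     ]
--     key = tuple(
--         [dim for group in zip(widths, heights, gaps + [0]) for dim in group][:-1]
--     )
--     merged_bbox = (
--         min(bbox[0] for bbox in bboxes_slice),
--         min(bbox[1] for bbox in bboxes_slice),
--         max(bbox[2] for bbox in bboxes_slice),
--         max(bbox[3] for bbox in bboxes_slice),
--     )
--
--     return key, merged_bbox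
-- ===== SOURCE B (Python) =====
-- def _get_key_and_merged_bbox(
--     bboxes: list[tuple[int, int, int, int]],
--     i: int,
--     n: int,
-- ) -> tuple[tuple[int, ...], tuple[int, int, int, int]]:
--     """Single pass: build key incrementally and track merged-bbox extrema."""
--     bs = bboxes[i : i + n]
--     x1, y1, x2, y2 = bs[0]
--     mx1, my1, mx2, my2 = x1, y1, x2, y2
--     key = []
--     for nxt in bs[1:]:
--         key.extend((x2 - x1, y2 - y1, nxt[0] - x2))
--         x1, y1, x2, y2 = nxt
--         mx1 = min(mx1, x1)
--         my1 = min(my1, y1)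
--         mx2 = max(mx2, x2)
--         my2 = max(my2, y2)
--     key.extend((x2 - x1, y2 - y1))
--     return tuple(key), (mx1, my1, mx2, my2)
-- ===== Notes on version B (the rewrite author's own statement) =====
-- stated objective: alternative
-- what changed: Replaced the three list comprehensions, the zip/flatten/[:-1] interleave trick and the four separate min/max generator scans with a single loop over the slice that builds the key incrementally and tracks the merged-bbox extrema at the same time.
import Mathlib
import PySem

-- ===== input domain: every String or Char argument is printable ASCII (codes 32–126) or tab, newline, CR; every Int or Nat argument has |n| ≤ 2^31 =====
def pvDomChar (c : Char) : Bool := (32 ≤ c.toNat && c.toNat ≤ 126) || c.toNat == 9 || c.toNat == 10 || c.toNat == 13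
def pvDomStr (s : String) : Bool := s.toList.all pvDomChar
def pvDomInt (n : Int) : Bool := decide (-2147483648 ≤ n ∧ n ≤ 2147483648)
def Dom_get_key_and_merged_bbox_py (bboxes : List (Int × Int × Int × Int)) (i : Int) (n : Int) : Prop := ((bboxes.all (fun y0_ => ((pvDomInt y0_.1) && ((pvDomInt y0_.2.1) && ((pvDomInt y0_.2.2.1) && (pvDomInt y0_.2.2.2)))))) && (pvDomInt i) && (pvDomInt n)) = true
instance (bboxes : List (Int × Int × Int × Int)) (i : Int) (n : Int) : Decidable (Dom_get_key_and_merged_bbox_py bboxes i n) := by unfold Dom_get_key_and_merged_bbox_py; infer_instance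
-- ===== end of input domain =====

-- ===== PORT A =====
-- A: three comprehensions (widths/heights/gaps), zip/flatten/[:-1] key, four min/max scans.
def get_key_and_merged_bbox_py (bboxes : List (Int × Int × Int × Int)) (i : Int) (n : Int) :
    List Int × (Int × Int × Int × Int) :=
  let bs := PySem.List.slice bboxes (some i) (some (i + n))
  let widths := bs.map (fun b => b.2.2.1 - b.1)
  let heights := bs.map (fun b => b.2.2.2 - b.2.1)
  let gaps := (PySem.List.pyRange 0 ((bs.length : Int) - 1) 1).map
      (fun j => (PySem.List.pyGetD bs (j + 1) (0, 0, 0, 0)).1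
              - (PySem.List.pyGetD bs j (0, 0, 0, 0)).2.2.1)
  let key := PySem.List.slice
      ((widths.zip (heights.zip (gaps ++ [0]))).flatMap (fun g => [g.1, g.2.1, g.2.2]))
      none (some (-1))
  let merged :=
      ( ((PySem.List.min? (bs.map (fun b => b.1)) (fun y => y)).getD 0)
      , ((PySem.List.min? (bs.map (fun b => b.2.1)) (fun y => y)).getD 0)
      , ((PySem.List.max? (bs.map (fun b => b.2.2.1)) (fun y => y)).getD 0)
      , ((PySem.List.max? (bs.map (fun b => b.2.2.2)) (fun y => y)).getD 0) )
  (key, merged)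

-- ===== PORT B =====
-- B: one loop over the slice, building the key incrementally and tracking extrema.
def get_key_and_merged_bbox_py_alt (bboxes : List (Int × Int × Int × Int)) (i : Int) (n : Int) :
    List Int × (Int × Int × Int × Int) :=
  let bs := PySem.List.slice bboxes (some i) (some (i + n))
  let c := PySem.List.pyGetD bs 0 (0, 0, 0, 0)
  let r := (PySem.List.slice bs (some 1) none).foldl
      (fun (st : List Int × (Int × Int × Int × Int) × (Int × Int × Int × Int)) nxt =>
        ( st.1 ++ [st.2.1.2.2.1 - st.2.1.1, st.2.1.2.2.2 - st.2.1.2.1, nxt.1 - st.2.1.2.2.1]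
        , nxt
        , ( min st.2.2.1 nxt.1, min st.2.2.2.1 nxt.2.1
          , max st.2.2.2.2.1 nxt.2.2.1, max st.2.2.2.2.2 nxt.2.2.2 ) ))
      (([] : List Int), c, c)
  (r.1 ++ [r.2.1.2.2.1 - r.2.1.1, r.2.1.2.2.2 - r.2.1.2.1], r.2.2)

-- ===== PRECONDITION & SPEC =====
-- Pre_ excludes exactly the inputs where the slice bboxes[i:i+n] is empty: there A's
-- min() raises ValueError (and B's bs[0] raises IndexError), so A returns no value.
def Pre_get_key_and_merged_bbox_py (bboxes : List (Int × Int × Int × Int)) (i : Int) (n : Int) : Prop :=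
  PySem.List.slice bboxes (some i) (some (i + n)) ≠ []
instance (bboxes : List (Int × Int × Int × Int)) (i : Int) (n : Int) :
    Decidable (Pre_get_key_and_merged_bbox_py bboxes i n) := by
  unfold Pre_get_key_and_merged_bbox_py; infer_instance
def pvWitness_get_key_and_merged_bbox_py : (List (Int × Int × Int × Int)) × Int × Int :=
  ([(0, 1, 4, 5), (6, 0, 9, 4)], 0, 2)
def Spec_get_key_and_merged_bbox_py (bboxes : List (Int × Int × Int × Int)) (i : Int) (n : Int)
    (out : List Int × (Int × Int × Int × Int)) : Prop :=
  out = get_key_and_merged_bbox_py_alt bboxes i n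
instance (bboxes : List (Int × Int × Int × Int)) (i : Int) (n : Int)
    (out : List Int × (Int × Int × Int × Int)) :
    Decidable (Spec_get_key_and_merged_bbox_py bboxes i n out) := by
  unfold Spec_get_key_and_merged_bbox_py; infer_instance

-- ===== CLAIM (what is proved, stated in full; the proofs are below) =====
def Claim_equal_get_key_and_merged_bbox_py : Prop :=
  ∀ (bboxes : List (Int × Int × Int × Int)) (i : Int) (n : Int),
    Dom_get_key_and_merged_bbox_py bboxes i n →
    Pre_get_key_and_merged_bbox_py bboxes i n →
    Spec_get_key_and_merged_bbox_py bboxes i n (get_key_and_merged_bbox_py bboxes i n)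

-- ===== LEMMAS AND PROOFS =====

/-- The interleaved key on a nonempty slice `c :: t`, as a structural recursion. -/
def pvInterKey (c : Int × Int × Int × Int) : List (Int × Int × Int × Int) → List Int
  | [] => [c.2.2.1 - c.1, c.2.2.2 - c.2.1]
  | d :: t => (c.2.2.1 - c.1) :: (c.2.2.2 - c.2.1) :: (d.1 - c.2.2.1) :: pvInterKey d t

/-- A's gaps comprehension equals the zip-with-tail form. -/
lemma pv_gaps_eq (bs : List (Int × Int × Int × Int)) :
    (PySem.List.pyRange 0 ((bs.length : Int) - 1) 1).map
      (fun j => (PySem.List.pyGetD bs (j + 1) (0, 0, 0, 0)).1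
              - (PySem.List.pyGetD bs j (0, 0, 0, 0)).2.2.1)
    = (bs.zip bs.tail).map (fun p => p.2.1 - p.1.2.2.1) := by
  have h1 : (PySem.List.pyRange 0 ((bs.length : Int) - 1) 1).map
      (fun j => (PySem.List.pyGetD bs (j + 1) (0, 0, 0, 0)).1
              - (PySem.List.pyGetD bs j (0, 0, 0, 0)).2.2.1)
      = (List.range (bs.length - 1)).map
      (fun k => (bs.getD (k + 1) (0, 0, 0, 0)).1 - (bs.getD k (0, 0, 0, 0)).2.2.1) := by
    rw [PySem.List.pyRange_one, List.map_map]
    have hlen : (((bs.length : Int) - 1) - 0).toNat = bs.length - 1 := by omega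
    rw [hlen]
    apply List.map_congr_left
    intro k _
    simp only [Function.comp]
    rw [show (0 : Int) + (k : Int) + 1 = ((k + 1 : Nat) : Int) by push_cast; ring,
        show (0 : Int) + (k : Int) = ((k : Nat) : Int) by ring,
        PySem.List.pyGetD_natCast, PySem.List.pyGetD_natCast]
  rw [h1]
  clear h1
  induction bs with
  | nil => simp
  | cons c t ih =>
    cases t with
    | nil => simp
    | cons d t' =>
      have hlen : (c :: d :: t').length - 1 = ((d :: t').length - 1) + 1 := by
        simp [List.length]
      rw [hlen, List.range_succ_eq_map]
      simp only [List.map_cons, List.map_map, List.zip_cons_cons, List.tail_cons]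
      simp only [List.tail_cons] at ih
      rw [← ih]
      congr 1

/-- A's key expression on a nonempty slice equals `pvInterKey`. -/
lemma pv_keyA_eq (c : Int × Int × Int × Int) (t : List (Int × Int × Int × Int)) :
    PySem.List.slice
      ((((c :: t).map (fun b => b.2.2.1 - b.1)).zip
        (((c :: t).map (fun b => b.2.2.2 - b.2.1)).zip
          ((((c :: t).zip (c :: t).tail).map (fun p => p.2.1 - p.1.2.2.1)) ++ [0]))).flatMap
        (fun g => [g.1, g.2.1, g.2.2]))
      none (some (-1))
    = pvInterKey c t := by
  rw [PySem.List.slice_to_neg_one]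
  induction t generalizing c with
  | nil => simp [pvInterKey]
  | cons d t' ih =>
    have hrest := ih d
    -- the tail flatMap is nonempty
    have hne : (((d :: t').map (fun b => b.2.2.1 - b.1)).zip
        (((d :: t').map (fun b => b.2.2.2 - b.2.1)).zip
          ((((d :: t').zip (d :: t').tail).map (fun p => p.2.1 - p.1.2.2.1)) ++ [0]))).flatMap
        (fun g => [g.1, g.2.1, g.2.2]) ≠ [] := by
      cases t' <;> simp
    rw [show (c :: d :: t').map (fun b => b.2.2.1 - b.1)
          = (c.2.2.1 - c.1) :: (d :: t').map (fun b => b.2.2.1 - b.1) from rfl,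
        show (c :: d :: t').map (fun b => b.2.2.2 - b.2.1)
          = (c.2.2.2 - c.2.1) :: (d :: t').map (fun b => b.2.2.2 - b.2.1) from rfl,
        show ((c :: d :: t').zip (c :: d :: t').tail).map (fun p => p.2.1 - p.1.2.2.1)
          = (d.1 - c.2.2.1) :: ((d :: t').zip (d :: t').tail).map (fun p => p.2.1 - p.1.2.2.1)
          from rfl,
        List.cons_append, List.zip_cons_cons, List.zip_cons_cons, List.flatMap_cons,
        List.dropLast_append_of_ne_nil hne, hrest]
    simp [pvInterKey]

/-- B's fold, with the final append, computes `pvInterKey` and the componentwise extrema. -/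
lemma pv_foldB (t : List (Int × Int × Int × Int)) :
    ∀ (c : Int × Int × Int × Int) (key0 : List Int) (m1 m2 m3 m4 : Int),
    (let r := t.foldl
      (fun (st : List Int × (Int × Int × Int × Int) × (Int × Int × Int × Int)) nxt =>
        ( st.1 ++ [st.2.1.2.2.1 - st.2.1.1, st.2.1.2.2.2 - st.2.1.2.1, nxt.1 - st.2.1.2.2.1]
        , nxt
        , ( min st.2.2.1 nxt.1, min st.2.2.2.1 nxt.2.1
          , max st.2.2.2.2.1 nxt.2.2.1, max st.2.2.2.2.2 nxt.2.2.2 ) ))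
      (key0, c, (m1, m2, m3, m4))
     (r.1 ++ [r.2.1.2.2.1 - r.2.1.1, r.2.1.2.2.2 - r.2.1.2.1], r.2.2))
    = ( key0 ++ pvInterKey c t
      , ( (t.map (fun b => b.1)).foldl min m1
        , (t.map (fun b => b.2.1)).foldl min m2
        , (t.map (fun b => b.2.2.1)).foldl max m3
        , (t.map (fun b => b.2.2.2)).foldl max m4 ) ) := by
  induction t with
  | nil => intro c key0 m1 m2 m3 m4; simp [pvInterKey]
  | cons d t' ih =>
    intro c key0 m1 m2 m3 m4
    simp only [List.foldl_cons, List.map_cons]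
    rw [ih d]
    simp [pvInterKey, List.append_assoc]

-- ===== VERDICT (by name: the statement is the Claim_ definition above) =====
theorem get_key_and_merged_bbox_py_spec : Claim_equal_get_key_and_merged_bbox_py := by
  intro bboxes i n _ hpre
  unfold Spec_get_key_and_merged_bbox_py
  unfold get_key_and_merged_bbox_py get_key_and_merged_bbox_py_alt
  unfold Pre_get_key_and_merged_bbox_py at hpre
  set bs := PySem.List.slice bboxes (some i) (some (i + n)) with hbs
  clear_value bs
  obtain ⟨c, t, rfl⟩ := List.exists_cons_of_ne_nil hpre
  simp only []
  rw [pv_gaps_eq, pv_keyA_eq]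
  rw [PySem.List.slice_from_one, List.tail_cons, PySem.List.pyGetD_zero_cons]
  rw [pv_foldB t c [] c.1 c.2.1 c.2.2.1 c.2.2.2]
  simp only [List.map_cons, PySem.List.min?_id_cons, PySem.List.max?_id_cons, Option.getD_some,
    List.nil_append]
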